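-- pv_equiv track=rewrite | github.com/shobith-s/AURORA-V2 | src/learning/privacy.py | k_anonymize_categories
-- ===== SOURCE A (Python) =====
-- from typing import Any, Dict, Optional, Tuple, List
--
-- def k_anonymize_categories(
--
--     categories: List[str],
--     k: int = 5,
--     suppress_threshold: int = 2
-- ) -> List[str]:
--     """
--     Apply k-anonymity to categories with suppression.
--
--     Args:
--         categories: List of categorical values
--         k: Minimum group size
--         suppress_threshold: Threshold below which to suppress
--
--     Returns:
--         Anonymized categories
--     """
--     from collections import Counter
--
--     counts = Counter(categories)
--     anonymized = []
--
--     for category in categories: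
--         if counts[category] < suppress_threshold:
--             anonymized.append('*')  # Suppress rare values
--         elif counts[category] < k:
--             anonymized.append('OTHER')  # Generalize
--         else:
--             anonymized.append(category)
--
--     return anonymized
-- ===== SOURCE B (Python) =====
-- def k_anonymize_categories(categories, k=5, suppress_threshold=2):
--     # Group the positions of each distinct category, then decide each group's
--     # label once and scatter it into a preallocated output list.
--     groups = {}
--     for i, cat in enumerate(categories):
--         groups.setdefault(cat, []).append(i)
--     out = [''] * len(categories)
--     for cat, idxs in groups.items():
--         n = len(idxs)
--         label = '*' if n < suppress_threshold else ('OTHER' if n < k else cat)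
--         for i in idxs:
--             out[i] = label
--     return out
-- ===== Notes on version B (the rewrite author's own statement) =====
-- stated objective: alternative
-- what changed: B groups the positions of each distinct category into index lists (setdefault/append over enumerate), then decides each group's label once and scatter-writes it into a preallocated output list, instead of A's Counter plus per-element threshold branching in input order.
import Mathlib
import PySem

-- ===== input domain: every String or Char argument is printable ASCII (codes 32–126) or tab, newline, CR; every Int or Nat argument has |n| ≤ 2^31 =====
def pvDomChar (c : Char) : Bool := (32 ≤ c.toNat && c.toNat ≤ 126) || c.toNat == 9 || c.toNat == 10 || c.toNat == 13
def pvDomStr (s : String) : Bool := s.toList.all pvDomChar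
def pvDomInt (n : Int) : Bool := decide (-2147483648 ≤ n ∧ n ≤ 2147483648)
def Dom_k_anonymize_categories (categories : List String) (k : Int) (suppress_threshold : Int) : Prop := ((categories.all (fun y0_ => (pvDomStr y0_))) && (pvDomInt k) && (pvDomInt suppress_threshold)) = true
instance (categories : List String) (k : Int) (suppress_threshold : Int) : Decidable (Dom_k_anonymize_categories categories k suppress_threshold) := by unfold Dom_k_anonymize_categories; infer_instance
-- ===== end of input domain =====

-- B groups the positions of each distinct category, decides each group's label once,
-- and scatter-writes it into a preallocated output list (objective: alternative).

-- ===== PORT A =====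
def k_anonymize_categories (categories : List String) (k : Int) (suppress_threshold : Int) : List String :=
  let counts := PySem.Dict.counter categories
  categories.foldl (fun anonymized category =>
    if counts.getD category 0 < suppress_threshold then anonymized ++ ["*"]
    else if counts.getD category 0 < k then anonymized ++ ["OTHER"]
    else anonymized ++ [category]) []

-- ===== PORT B =====
def k_anonymize_categories_alt (categories : List String) (k : Int) (suppress_threshold : Int) : List String :=
  -- groups.setdefault(cat, []).append(i)  ==  modify cat [] (· ++ [i])
  let groups := (PySem.List.enumerate categories).foldl
    (fun g (p : Int × String) => g.modify p.2 [] (fun l => l ++ [p.1])) PySem.Dict.empty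
  let out0 : List String := List.replicate categories.length ""
  groups.items.foldl (fun out (q : String × List Int) =>
    let n : Int := q.2.length
    let label := if n < suppress_threshold then "*" else if n < k then "OTHER" else q.1
    q.2.foldl (fun o i => PySem.List.pySetD o i label) out) out0

-- ===== PRECONDITION & SPEC =====
def Spec_k_anonymize_categories (categories : List String) (k : Int) (suppress_threshold : Int) (out : List String) : Prop := out = k_anonymize_categories_alt categories k suppress_threshold
instance (categories : List String) (k : Int) (suppress_threshold : Int) (out : List String) : Decidable (Spec_k_anonymize_categories categories k suppress_threshold out) := by unfold Spec_k_anonymize_categories; infer_instance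

-- ===== CLAIM (what is proved, stated in full; the proofs are below) =====
def Claim_equal_k_anonymize_categories : Prop := ∀ (categories : List String) (k : Int) (suppress_threshold : Int), Dom_k_anonymize_categories categories k suppress_threshold → Spec_k_anonymize_categories categories k suppress_threshold (k_anonymize_categories categories k suppress_threshold)

-- ===== LEMMAS AND PROOFS =====

-- the per-category label both programs assign to a category occurring cnt times
def pvLab (k st cnt : Int) (c : String) : String :=
  if cnt < st then "*" else if cnt < k then "OTHER" else c

-- the index list B's grouping loop stores under key c
def pvIdxs (categories : List String) (c : String) : List Int :=
  ((PySem.List.enumerate categories).filter (fun p => p.2 == c)).map (·.1)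

lemma mem_pvIdxs (categories : List String) (c : String) (x : Int) :
    x ∈ pvIdxs categories c ↔ ∃ (j : Nat) (h : j < categories.length), x = (j : Int) ∧ categories[j] = c := by
  simp only [pvIdxs, List.mem_map, List.mem_filter, PySem.List.mem_enumerate_iff]
  constructor
  · rintro ⟨p, ⟨⟨j, hj, rfl⟩, hc⟩, rfl⟩
    exact ⟨j, hj, by simpa using hc⟩
  · rintro ⟨j, hj, rfl, hc⟩
    exact ⟨((j : Int), categories[j]), ⟨⟨j, hj, by simp⟩, by simpa using hc⟩, rfl⟩

lemma len_pvIdxs (categories : List String) (c : String) :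
    (pvIdxs categories c).length = categories.count c := by
  simp only [pvIdxs, List.length_map, ← List.countP_eq_length_filter]
  conv_rhs => rw [← PySem.List.map_snd_enumerate categories 0]
  rw [List.count_eq_countP, List.countP_map]
  rfl

-- B's grouping dict holds exactly pvIdxs under each key
lemma getD_groups (categories : List String) (c : String) :
    ((PySem.List.enumerate categories).foldl
      (fun g (p : Int × String) => g.modify p.2 [] (fun l => l ++ [p.1]))
      (PySem.Dict.empty : PySem.Dict String (List Int))).getD c [] = pvIdxs categories c := by
  have h : (PySem.List.enumerate categories).foldl
      (fun g (p : Int × String) => g.modify p.2 [] (fun l => l ++ [p.1]))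
      (PySem.Dict.empty : PySem.Dict String (List Int))
      = ((PySem.List.enumerate categories).map Prod.swap).foldl
        (fun g (p : String × Int) => g.modify p.1 [] (fun l => l ++ [p.2])) PySem.Dict.empty := by
    rw [List.foldl_map]; rfl
  rw [h, PySem.Dict.getD_foldl_modify_append]
  simp only [PySem.Dict.getD_empty, List.nil_append, pvIdxs]
  rw [List.filter_map]
  simp [List.map_map, Function.comp_def, Prod.swap]

lemma keys_groups (categories : List String) :
    ((PySem.List.enumerate categories).foldl
      (fun g (p : Int × String) => g.modify p.2 [] (fun l => l ++ [p.1]))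
      (PySem.Dict.empty : PySem.Dict String (List Int))).keys = PySem.Set.ofList categories := by
  rw [PySem.Dict.keys_foldl_modify_key]
  simp [PySem.Set.update_nil_left, PySem.List.map_snd_enumerate]

lemma nodup_keys_groups (categories : List String) :
    ((PySem.List.enumerate categories).foldl
      (fun g (p : Int × String) => g.modify p.2 [] (fun l => l ++ [p.1]))
      (PySem.Dict.empty : PySem.Dict String (List Int))).keys.Nodup := by
  rw [keys_groups]; exact PySem.Set.nodup_ofList categories

-- with Nodup keys, items is keys paired with their getD values
lemma items_eq_keys_map (d : PySem.Dict String (List Int)) (h : d.keys.Nodup) :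
    d.items = d.keys.map (fun c => (c, d.getD c [])) := by
  simp only [PySem.Dict.keys, List.map_map]
  conv_lhs => rw [← List.map_id d.items]
  apply List.map_congr_left
  intro p hp
  have hg : d.getD p.1 [] = p.2 :=
    PySem.Dict.getD_of_mem_items d (k := p.1) (v := p.2) (by simpa using hp) h []
  simp [hg]

lemma items_groups (categories : List String) :
    ((PySem.List.enumerate categories).foldl
      (fun g (p : Int × String) => g.modify p.2 [] (fun l => l ++ [p.1]))
      (PySem.Dict.empty : PySem.Dict String (List Int))).items
      = (PySem.Set.ofList categories).map (fun c => (c, pvIdxs categories c)) := by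
  rw [items_eq_keys_map _ (nodup_keys_groups categories), keys_groups]
  exact List.map_congr_left (fun c _ => by rw [getD_groups])

-- scatter-writing a constant value: lengths are preserved
lemma length_foldl_pySetD (ix : List Int) (v : String) (o : List String) :
    (ix.foldl (fun o i => PySem.List.pySetD o i v) o).length = o.length := by
  induction ix generalizing o with
  | nil => rfl
  | cons i rest ih => simp [ih, PySem.List.length_pySetD]

-- scatter-writing a constant value, read back at position j
lemma getD_foldl_pySetD (ix : List Int) (v : String) (o : List String)
    (hix : ∀ i ∈ ix, 0 ≤ i) (j : Nat) :
    (ix.foldl (fun o i => PySem.List.pySetD o i v) o).getD j ""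
      = if ((j : Int) ∈ ix ∧ j < o.length) then v else o.getD j "" := by
  induction ix generalizing o with
  | nil => simp
  | cons i rest ih =>
    have hi : 0 ≤ i := hix i (by simp)
    simp only [List.foldl_cons]
    rw [ih _ (fun x hx => hix x (by simp [hx]))]
    rw [PySem.List.pySetD_of_nonneg _ _ hi]
    by_cases hmem : (j : Int) ∈ rest ∧ j < (o.set i.toNat v).length
    · rw [if_pos hmem, if_pos ⟨by simp [hmem.1], by simpa using hmem.2⟩]
    · rw [if_neg hmem]
      simp only [List.length_set] at hmem
      by_cases hji : (j : Int) = i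
      · by_cases hjl : j < o.length
        · rw [if_pos ⟨by simp [hji], hjl⟩]
          have : j = i.toNat := by omega
          subst this
          rw [List.getD_eq_getElem _ _ (by simpa using hjl), List.getElem_set_self]
        · rw [if_neg (by tauto)]
          rw [List.getD_eq_default _ _ (by simpa using Nat.le_of_not_lt hjl),
            List.getD_eq_default _ _ (Nat.le_of_not_lt hjl)]
      · rw [if_neg (by rintro ⟨h1, h2⟩; rcases List.mem_cons.mp h1 with h | h; exact hji h; exact hmem ⟨h, h2⟩)]
        by_cases hjl : j < o.length
        · have hne : i.toNat ≠ j := by omega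
          rw [List.getD_eq_getElem _ _ (by simpa using hjl), List.getD_eq_getElem _ _ hjl,
            List.getElem_set_ne hne]
        · rw [List.getD_eq_default _ _ (by simpa using Nat.le_of_not_lt hjl),
            List.getD_eq_default _ _ (Nat.le_of_not_lt hjl)]

-- the outer scatter loop over distinct categories, read back at position j
lemma getD_scatter (k st : Int) (categories : List String) (S : List String) (hS : S.Nodup)
    (o : List String) (ho : o.length = categories.length) (j : Nat) (hj : j < categories.length) :
    ((S.map (fun c => (c, pvIdxs categories c))).foldl
        (fun out (q : String × List Int) =>
          q.2.foldl (fun o i => PySem.List.pySetD o i (pvLab k st q.2.length q.1)) out) o).getD j ""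
      = if categories[j] ∈ S then pvLab k st (categories.count categories[j]) categories[j]
        else o.getD j "" := by
  induction S generalizing o with
  | nil => simp
  | cons c S' ih =>
    have hnn : ∀ i ∈ pvIdxs categories c, 0 ≤ i := by
      intro i hi; rcases (mem_pvIdxs _ _ _).mp hi with ⟨m, _, rfl, _⟩; exact Int.natCast_nonneg m
    simp only [List.map_cons, List.foldl_cons]
    rw [ih hS.of_cons _ (by rw [length_foldl_pySetD]; exact ho)]
    rw [getD_foldl_pySetD _ _ _ hnn]
    have hmemiff : ((j : Int) ∈ pvIdxs categories c ∧ j < o.length) ↔ categories[j] = c := by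
      constructor
      · rintro ⟨h1, _⟩
        rcases (mem_pvIdxs _ _ _).mp h1 with ⟨m, hm, he, hc⟩
        have : j = m := by exact_mod_cast he
        subst this; exact hc
      · intro h; exact ⟨(mem_pvIdxs _ _ _).mpr ⟨j, hj, rfl, h⟩, by omega⟩
    by_cases hc : categories[j] = c
    · have hnot : categories[j] ∉ S' := hc ▸ (List.nodup_cons.mp hS).1
      rw [if_neg hnot, if_pos (hmemiff.mpr hc), if_pos (show categories[j] ∈ c :: S' by simp [hc])]
      rw [len_pvIdxs, hc]
    · rw [if_neg (fun h => hc (hmemiff.mp h))]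
      by_cases hm : categories[j] ∈ S'
      · rw [if_pos hm, if_pos (List.mem_cons_of_mem c hm)]
      · rw [if_neg hm, if_neg (show categories[j] ∉ c :: S' by simp [hc, hm])]

-- both ports compute the pointwise labelling map
lemma alt_eq_map (categories : List String) (k st : Int) :
    k_anonymize_categories_alt categories k st
      = categories.map (fun c => pvLab k st (categories.count c) c) := by
  unfold k_anonymize_categories_alt
  simp only [items_groups]
  have hlab : (fun out (q : String × List Int) =>
      q.2.foldl (fun o i => PySem.List.pySetD o i
        (if (q.2.length : Int) < st then "*" else if (q.2.length : Int) < k then "OTHER" else q.1)) out)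
      = (fun out (q : String × List Int) =>
      q.2.foldl (fun o i => PySem.List.pySetD o i (pvLab k st q.2.length q.1)) out) := by
    funext out q; rfl
  rw [hlab]
  apply List.ext_getElem
  · have := length_foldl_pySetD
    rw [List.length_map]
    -- length of the scatter fold over items
    have : ∀ (L : List (String × List Int)) (o : List String),
        (L.foldl (fun out (q : String × List Int) =>
          q.2.foldl (fun o i => PySem.List.pySetD o i (pvLab k st q.2.length q.1)) out) o).length
          = o.length := by
      intro L
      induction L with
      | nil => intro o; rfl
      | cons q L ih => intro o; rw [List.foldl_cons, ih, length_foldl_pySetD]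
    rw [this, List.length_replicate]
  · intro j h1 h2
    rw [List.getElem_map]
    have hj : j < categories.length := by simpa using h2
    rw [← List.getD_eq_getElem _ "" h1]
    rw [getD_scatter k st categories _ (PySem.Set.nodup_ofList categories) _
      (by simp) j hj]
    rw [if_pos ((PySem.Set.mem_ofList _ _).mpr (categories.getElem_mem hj))]

theorem k_anonymize_categories_spec : Claim_equal_k_anonymize_categories := by
  intro categories k st _
  unfold Spec_k_anonymize_categories
  rw [alt_eq_map]
  show (categories.foldl (fun anonymized category =>
      if (PySem.Dict.counter categories).getD category 0 < st then anonymized ++ ["*"]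
      else if (PySem.Dict.counter categories).getD category 0 < k then anonymized ++ ["OTHER"]
      else anonymized ++ [category]) []) = _
  rw [show (fun (anonymized : List String) (category : String) =>
      if (PySem.Dict.counter categories).getD category 0 < st then anonymized ++ ["*"]
      else if (PySem.Dict.counter categories).getD category 0 < k then anonymized ++ ["OTHER"]
      else anonymized ++ [category])
    = (fun anonymized category => anonymized ++
        [if (PySem.Dict.counter categories).getD category 0 < st then "*"
         else if (PySem.Dict.counter categories).getD category 0 < k then "OTHER" else category])
    from by funext a c; split_ifs <;> rfl]
  rw [PySem.List.foldl_append_singleton_eq_map]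
  apply List.map_congr_left
  intro c _
  simp [PySem.Dict.getD_counter, pvLab]
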